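-- pv_equiv track=rewrite | github.com/mariabandeira/Projeto_Final_IIA | modules/create_df.py | pre_treat
-- ===== SOURCE A (Python) =====
-- def pre_treat(review_pages: list):
--     '''
--     # i - página
--     # j - review
--     # k - elemento da review
--     # reviews[i][j][k]
--     '''
--     treated = []
--     for page in review_pages:
--         reviews = []
--         for review in page:
--             review_info = []
--
--             for k in range(len(review)):
--                 element = review[k]
--                 if element.find('\n') != -1:
--                     review_info.append(element)
--                     review_info.append(review[-1])
--                     break
--                 review_info.append(element)
--
--             reviews.append(review_info)
--         treated.append(reviews)
--     return treated
-- ===== SOURCE B (Python) =====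
-- def pre_treat(review_pages: list):
--     treated = []
--     for page in review_pages:
--         reviews = []
--         for review in page:
--             idx = next((i for i in range(len(review)) if review[i].find('\n') != -1), None)
--             if idx is None:
--                 reviews.append(review[:])
--             else:
--                 reviews.append(review[:idx + 1] + [review[-1]])
--         treated.append(reviews)
--     return treated
-- ===== Notes on version B (the rewrite author's own statement) =====
-- stated objective: alternative
-- what changed: Replaces the element-by-element accumulating break-loop with a locate-then-slice decomposition: find the index of the first element containing a newline, then build the result as one slice (plus the last element) instead of appending inside the loop.
import Mathlib
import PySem

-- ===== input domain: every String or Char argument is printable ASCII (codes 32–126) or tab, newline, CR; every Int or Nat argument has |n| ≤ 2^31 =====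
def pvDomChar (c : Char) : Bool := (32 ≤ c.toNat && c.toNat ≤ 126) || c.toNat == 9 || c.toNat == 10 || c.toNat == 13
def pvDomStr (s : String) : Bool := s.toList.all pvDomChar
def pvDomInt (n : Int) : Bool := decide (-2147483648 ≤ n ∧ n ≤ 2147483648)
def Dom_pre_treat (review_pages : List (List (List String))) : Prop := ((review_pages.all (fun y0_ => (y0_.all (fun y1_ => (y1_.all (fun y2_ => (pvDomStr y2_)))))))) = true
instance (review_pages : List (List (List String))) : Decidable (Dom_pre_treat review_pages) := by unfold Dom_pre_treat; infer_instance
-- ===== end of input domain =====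

-- B replaces the accumulating break-loop with locate-first-newline-then-slice; same cost, different decomposition.
-- ===== PORT A =====
-- inner for-k loop with break; `last` is review[-1] (only read when the list is nonempty)
def pre_treat_inner (last : String) : List String → List String
  | [] => []
  | e :: rest =>
    if PySem.Str.find e "\n" ≠ -1 then [e, last]
    else e :: pre_treat_inner last rest

def pre_treat (review_pages : List (List (List String))) : List (List (List String)) :=
  review_pages.map (fun page =>
    page.map (fun review => pre_treat_inner (review.getLastD "") review))

-- ===== PORT B =====
def pre_treat_alt (review_pages : List (List (List String))) : List (List (List String)) :=
  review_pages.map (fun page =>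
    page.map (fun review =>
      match review.findIdx? (fun e => PySem.Str.find e "\n" ≠ -1) with
      | none => review
      | some i => review.take (i + 1) ++ [review.getLastD ""]))

-- ===== PRECONDITION & SPEC =====
def Spec_pre_treat (review_pages : List (List (List String))) (out : List (List (List String))) : Prop := out = pre_treat_alt review_pages
instance (review_pages : List (List (List String))) (out : List (List (List String))) : Decidable (Spec_pre_treat review_pages out) := by unfold Spec_pre_treat; infer_instance

-- ===== CLAIM (what is proved, stated in full; the proofs are below) =====
def Claim_equal_pre_treat : Prop := ∀ (review_pages : List (List (List String))), Dom_pre_treat review_pages → Spec_pre_treat review_pages (pre_treat review_pages)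

-- ===== LEMMAS AND PROOFS =====

-- ===== VERDICT (by name: the statement is the Claim_ definition above) =====
theorem inner_eq (last : String) (xs : List String) :
    pre_treat_inner last xs =
      match xs.findIdx? (fun e => PySem.Str.find e "\n" ≠ -1) with
      | none => xs
      | some i => xs.take (i + 1) ++ [last] := by
  induction xs with
  | nil => simp [pre_treat_inner]
  | cons e rest ih =>
    simp only [pre_treat_inner, List.findIdx?_cons, ih]
    by_cases h : PySem.Str.find e "\n" = -1
    · rw [if_neg (by simpa using h), if_neg (by simpa using h)]
      cases hf : rest.findIdx? (fun e => PySem.Str.find e "\n" ≠ -1) <;>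
        simp only [Option.map_none, Option.map_some, List.take_succ_cons, List.cons_append]
    · rw [if_pos (by simpa using h), if_pos (by simpa using h)]
      simp

theorem pre_treat_spec : Claim_equal_pre_treat := by
  intro rp _
  unfold Spec_pre_treat pre_treat pre_treat_alt
  simp only [inner_eq]
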